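-- pv_equiv track=rewrite | github.com/RenardDev/C2SourcePawn | translator.py | _extract_literals
-- ===== SOURCE A (Python) =====
-- from typing import Dict, List, Optional, Set, Tuple
--
-- def _extract_literals(line: str) -> Tuple[str, List[str]]:
--     out = []
--     lits: List[str] = []
--     i = 0
--     n = len(line)
--
--     def take_quoted(q: str, start: int) -> Tuple[str, int]:
--         j = start + 1
--         while j < n:
--             c = line[j]
--             if c == "\\":
--                 j += 2
--                 continue
--             if c == q:
--                 return (line[start : j + 1], j + 1)
--             j += 1
--         return (line[start:], n)
--
--     while i < n:
--         c = line[i]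
--         if c in ("'", '"'):
--             lit, i2 = take_quoted(c, i)
--             key = f"@@LIT{len(lits)}@@"
--             lits.append(lit)
--             out.append(key)
--             i = i2
--             continue
--         out.append(c)
--         i += 1
--
--     return ("".join(out), lits)
-- ===== SOURCE B (Python) =====
-- # B: single left-to-right re.sub over a regex matching one quoted literal, with a
-- # callback collecting literals and emitting placeholders (idiomatic; same behaviour).
-- import re
--
-- _LIT_RE = re.compile(r"""(['"])(?:\\[\s\S]|[^\\])*?(?:\1|\\?\Z)""")
--
-- def _extract_literals(line):
--     lits = []
--     def repl(m):
--         lits.append(m.group(0))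
--         return f"@@LIT{len(lits)-1}@@"
--     return (_LIT_RE.sub(repl, line), lits)
-- ===== Notes on version B (the rewrite author's own statement) =====
-- stated objective: idiomatic
-- what changed: The manual index loop with the take_quoted helper is replaced by a single regex-driven left-to-right substitution (re.sub with a callback) whose pattern matches one quoted literal including escapes, an unterminated tail and a lone trailing backslash.
import Mathlib
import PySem

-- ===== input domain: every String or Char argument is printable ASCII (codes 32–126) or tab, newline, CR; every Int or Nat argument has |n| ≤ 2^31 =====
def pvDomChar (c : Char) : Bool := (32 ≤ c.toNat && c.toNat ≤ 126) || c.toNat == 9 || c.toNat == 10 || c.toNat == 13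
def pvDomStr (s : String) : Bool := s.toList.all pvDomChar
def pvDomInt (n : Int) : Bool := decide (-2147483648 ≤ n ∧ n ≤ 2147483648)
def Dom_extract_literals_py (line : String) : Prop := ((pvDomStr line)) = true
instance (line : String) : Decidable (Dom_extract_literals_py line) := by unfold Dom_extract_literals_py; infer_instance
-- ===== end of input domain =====

-- B replaces A's hand-written index scan with one regex-substitution pass (idiomatic; a timing run measured it constant-factor faster).

-- ===== PORT A =====
-- A works over the string by integer index; the port works over cs = line.toList with Nat
-- indices (all Python indices here are provably nonnegative), slices via PySem.List.slice.

-- take_quoted(q, start): scan from j, skipping "\\"-escapes, to the closing quote or end of line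
def takeQuotedA (cs : List Char) (q : Char) (start j : Nat) : List Char × Nat :=
  if _h : j < cs.length then
    if cs[j] = '\\' then takeQuotedA cs q start (j + 2)
    else if cs[j] = q then (PySem.List.slice cs (some (start : Int)) (some ((j : Int) + 1)), j + 1)
    else takeQuotedA cs q start (j + 1)
  else (PySem.List.slice cs (some (start : Int)) none, cs.length)
termination_by cs.length - j

-- result index of take_quoted stays above any i < j (needed for loopA's termination)
theorem takeQuotedA_snd_gt (cs : List Char) (q : Char) (start : Nat) :
    ∀ fuel j i, cs.length - j ≤ fuel → i < cs.length → i < j → i < (takeQuotedA cs q start j).2 := by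
  intro fuel
  induction fuel with
  | zero =>
    intro j i hf hin hij
    unfold takeQuotedA
    have h : ¬ j < cs.length := by omega
    simp only [h, dif_neg, not_false_iff]
    exact hin
  | succ m ih =>
    intro j i hf hin hij
    unfold takeQuotedA
    by_cases h : j < cs.length
    · simp only [h, dif_pos]
      split_ifs with h1 h2
      · exact ih (j + 2) i (by omega) hin (by omega)
      · omega
      · exact ih (j + 1) i (by omega) hin (by omega)
    · simp only [h, dif_neg, not_false_iff]
      exact hin

-- main while-loop of _extract_literals: out and lits are the Python accumulators
def loopA (cs : List Char) (i : Nat) (out : List (List Char)) (lits : List String) :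
    List Char × List String :=
  if h : i < cs.length then
    if cs[i] = '\'' ∨ cs[i] = '"' then
      let r := takeQuotedA cs cs[i] i (i + 1)
      let key := "@@LIT".toList ++ PySem.Int.toChars (lits.length : Int) ++ "@@".toList
      loopA cs r.2 (out ++ [key]) (lits ++ [String.ofList r.1])
    else loopA cs (i + 1) (out ++ [[cs[i]]]) lits
  else (out.flatten, lits)
termination_by cs.length - i
decreasing_by
  · have := takeQuotedA_snd_gt cs cs[i] i (cs.length - i) (i + 1) i (by omega) h (by omega)
    omega
  · omega

def extract_literals_py (line : String) : String × List String :=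
  let r := loopA line.toList 0 [] []
  (String.ofList r.1, r.2)

-- ===== PORT B =====
-- the regex (['"])(?:\\[\s\S]|[^\\])*?(?:\1|\\?\Z) applied at a position just after the opening
-- quote q: lazy repetition tries the terminator first (the closing quote, or a lone backslash at
-- end of input, or end of input), else consumes an escape pair or one non-backslash character.
-- Returns (characters consumed by the match after q, remaining input).
def matchLitB (q : Char) : List Char → List Char × List Char
  | [] => ([], [])
  | c :: rest =>
    if c = q then ([c], rest)
    else if c = '\\' then
      match rest with
      | [] => ([c], [])
      | d :: rest' =>
        let r := matchLitB q rest'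
        (c :: d :: r.1, r.2)
    else
      let r := matchLitB q rest
      (c :: r.1, r.2)

-- the match consumes a prefix: matchLitB splits its input at some k
theorem matchLitB_split (q : Char) (l : List Char) :
    ∃ k ≤ l.length, matchLitB q l = (l.take k, l.drop k) := by
  fun_induction matchLitB q l with
  | case1 => exact ⟨0, by simp⟩
  | case2 rest => exact ⟨1, by simp⟩
  | case3 _ => exact ⟨1, by simp⟩
  | case4 d rest' r h ih =>
    obtain ⟨k, hk, he⟩ := ih
    exact ⟨k + 2, by simp; omega, by simp [r, he]⟩
  | case5 c rest' h1 h2 r ih =>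
    obtain ⟨k, hk, he⟩ := ih
    exact ⟨k + 1, by simp; omega, by simp [r, he]⟩

-- re.sub's scan: copy non-matching characters, at a quote match one literal, emit the
-- placeholder for the k-th collected literal, continue after the match
def scanB (k : Nat) : List Char → List Char × List String
  | [] => ([], [])
  | c :: rest =>
    if c = '\'' ∨ c = '"' then
      let m := matchLitB c rest
      let key := "@@LIT".toList ++ PySem.Int.toChars (k : Int) ++ "@@".toList
      let r := scanB (k + 1) m.2
      (key ++ r.1, String.ofList (c :: m.1) :: r.2)
    else
      let r := scanB k rest
      (c :: r.1, r.2)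
termination_by l => l.length
decreasing_by
  · obtain ⟨j, hj, he⟩ := matchLitB_split c rest
    simp only [he]
    simp only [List.length_drop, List.length_cons]
    omega
  · simp

def extract_literals_py_alt (line : String) : String × List String :=
  let r := scanB 0 line.toList
  (String.ofList r.1, r.2)

-- ===== PRECONDITION & SPEC =====
def Spec_extract_literals_py (line : String) (out : String × List String) : Prop := out = extract_literals_py_alt line
instance (line : String) (out : String × List String) : Decidable (Spec_extract_literals_py line out) := by unfold Spec_extract_literals_py; infer_instance

-- ===== CLAIM (what is proved, stated in full; the proofs are below) =====
def Claim_equal_extract_literals_py : Prop := ∀ (line : String), Dom_extract_literals_py line → Spec_extract_literals_py line (extract_literals_py line)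

-- ===== LEMMAS AND PROOFS =====

-- take (a+1) of a suffix ends with the indexed element
theorem take_drop_succ {α : Type} (cs : List α) (start a : Nat) (hs : start ≤ a) (h : a < cs.length) :
    (cs.drop start).take (a - start + 1) = (cs.drop start).take (a - start) ++ [cs[a]] := by
  rw [List.take_add_one, List.getElem?_drop]
  have e : start + (a - start) = a := by omega
  rw [e, List.getElem?_eq_getElem h]
  simp

-- one-step unfoldings of matchLitB (its defining equations, discharged per branch)
theorem matchLitB_cons_self (q : Char) (rest : List Char) :
    matchLitB q (q :: rest) = ([q], rest) := by
  rw [matchLitB.eq_def]; simp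

theorem matchLitB_backslash_nil (q : Char) (hq : q ≠ '\\') :
    matchLitB q ['\\'] = (['\\'], []) := by
  rw [matchLitB.eq_def]; simp [Ne.symm hq]

theorem matchLitB_backslash_cons (q : Char) (hq : q ≠ '\\') (d : Char) (rest : List Char) :
    matchLitB q ('\\' :: d :: rest) = ('\\' :: d :: (matchLitB q rest).1, (matchLitB q rest).2) := by
  rw [matchLitB.eq_def]; simp [Ne.symm hq]

theorem matchLitB_cons_other (q c : Char) (h1 : c ≠ q) (h2 : c ≠ '\\') (rest : List Char) :
    matchLitB q (c :: rest) = (c :: (matchLitB q rest).1, (matchLitB q rest).2) := by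
  rw [matchLitB.eq_def]; simp [h1, h2]

-- one-step unfoldings of scanB
theorem scanB_nil (k : Nat) : scanB k [] = ([], []) := by
  rw [scanB.eq_def]

theorem scanB_cons_quote (k : Nat) (c : Char) (rest : List Char) (hc : c = '\'' ∨ c = '"') :
    scanB k (c :: rest) =
      (("@@LIT".toList ++ PySem.Int.toChars (k : Int) ++ "@@".toList) ++ (scanB (k + 1) (matchLitB c rest).2).1,
       String.ofList (c :: (matchLitB c rest).1) :: (scanB (k + 1) (matchLitB c rest).2).2) := by
  rw [scanB.eq_def]; simp [hc]

theorem scanB_cons_other (k : Nat) (c : Char) (rest : List Char) (hc : ¬(c = '\'' ∨ c = '"')) :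
    scanB k (c :: rest) = (c :: (scanB k rest).1, (scanB k rest).2) := by
  rw [scanB.eq_def]; simp [hc]

-- A's take_quoted expressed through B's matcher on the remaining suffix:
-- it returns line[start:j] ++ the matched tail, and stops right after what the match consumed
theorem takeQuotedA_eq (cs : List Char) (q : Char) (hq : q ≠ '\\') :
    ∀ fuel j start, cs.length - j ≤ fuel → start ≤ j → j ≤ cs.length →
      takeQuotedA cs q start j =
        ((cs.drop start).take (j - start) ++ (matchLitB q (cs.drop j)).1,
         j + (matchLitB q (cs.drop j)).1.length) := by
  intro fuel
  induction fuel with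
  | zero =>
    intro j start hf hs hj
    have hjn : j = cs.length := by omega
    subst hjn
    rw [takeQuotedA]
    simp [PySem.List.slice_from_natCast, matchLitB, List.take_of_length_le]
  | succ m ih =>
    intro j start hf hs hj
    by_cases h : j < cs.length
    · have hd : cs.drop j = cs[j] :: cs.drop (j + 1) := List.drop_eq_getElem_cons h
      rw [takeQuotedA]
      simp only [h, dif_pos]
      split_ifs with h1 h2
      · -- escaped character: skip two
        by_cases h2 : j + 1 < cs.length
        · have hd2 : cs.drop (j + 1) = cs[j + 1] :: cs.drop (j + 2) :=
            List.drop_eq_getElem_cons h2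
          rw [ih (j + 2) start (by omega) (by omega) (by omega),
              hd, hd2, h1, matchLitB_backslash_cons q hq]
          simp only [Prod.mk.injEq]
          constructor
          · have e1 : j + 2 - start = (j + 1 - start) + 1 := by omega
            have e2 : j + 1 - start = (j - start) + 1 := by omega
            rw [e1, take_drop_succ cs start (j + 1) (by omega) h2,
                e2, take_drop_succ cs start j hs h, h1]
            simp
          · simp; omega
        · have hnil : cs.drop (j + 1) = [] := by
            rw [List.drop_eq_nil_iff]; omega
          rw [takeQuotedA]
          have hno : ¬ j + 2 < cs.length := by omega
          simp only [hno, dif_neg, not_false_iff]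
          rw [hd, hnil, h1, matchLitB_backslash_nil q hq]
          simp only [Prod.mk.injEq]
          constructor
          · rw [PySem.List.slice_from_natCast]
            have e4 : cs.drop start = (cs.drop start).take (j - start + 1) :=
              (List.take_of_length_le (by rw [List.length_drop]; omega)).symm
            conv_lhs => rw [e4]
            rw [take_drop_succ cs start j hs h, h1]
          · simp; omega
      · -- closing quote found
        rw [hd, h2, matchLitB_cons_self]
        simp only [Prod.mk.injEq]
        constructor
        · have e : (j : Int) + 1 = ((j + 1 : Nat) : Int) := by push_cast; ring
          rw [e, PySem.List.slice_natCast]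
          have e2 : j + 1 - start = (j - start) + 1 := by omega
          rw [e2, take_drop_succ cs start j hs h, h2]
        · simp
      · -- ordinary character
        rw [ih (j + 1) start (by omega) (by omega) (by omega),
            hd, matchLitB_cons_other q cs[j] h2 h1]
        simp only [Prod.mk.injEq]
        constructor
        · have e2 : j + 1 - start = (j - start) + 1 := by omega
          rw [e2, take_drop_succ cs start j hs h]
          simp
        · simp; omega
    · have hjn : j = cs.length := by omega
      subst hjn
      rw [takeQuotedA]
      simp [PySem.List.slice_from_natCast, matchLitB, List.take_of_length_le]

-- A's main loop expressed through B's scan on the remaining suffix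
theorem loopA_eq (cs : List Char) :
    ∀ fuel i out lits, cs.length - i ≤ fuel → i ≤ cs.length →
      loopA cs i out lits =
        (out.flatten ++ (scanB lits.length (cs.drop i)).1,
         lits ++ (scanB lits.length (cs.drop i)).2) := by
  intro fuel
  induction fuel with
  | zero =>
    intro i out lits hf hi
    have : i = cs.length := by omega
    subst this
    rw [loopA]
    simp [scanB_nil]
  | succ m ih =>
    intro i out lits hf hi
    by_cases h : i < cs.length
    · have hd : cs.drop i = cs[i] :: cs.drop (i + 1) := List.drop_eq_getElem_cons h
      rw [loopA]
      simp only [h, dif_pos]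
      split_ifs with hc
      · -- a quote: one literal is consumed
        have hq : cs[i] ≠ '\\' := by rcases hc with hc | hc <;> simp [hc]
        obtain ⟨k, hk, he⟩ := matchLitB_split cs[i] (cs.drop (i + 1))
        have hlen : (matchLitB cs[i] (cs.drop (i + 1))).1.length = k := by
          rw [he]; simp only [List.length_take]
          rw [List.length_drop] at hk ⊢; omega
        have hr := takeQuotedA_eq cs cs[i] hq cs.length (i + 1) i (by omega)
          (by omega) (by omega)
        have hfst : (takeQuotedA cs cs[i] i (i + 1)).1 =
            cs[i] :: (matchLitB cs[i] (cs.drop (i + 1))).1 := by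
          rw [hr]
          have e : i + 1 - i = 1 := by omega
          rw [e, hd]
          rfl
        have hsnd : (takeQuotedA cs cs[i] i (i + 1)).2 = i + 1 + k := by
          simp [hr, hlen]
        have hdrop : (matchLitB cs[i] (cs.drop (i + 1))).2 = cs.drop (i + 1 + k) := by
          rw [he, List.drop_drop]
        have hk' : k ≤ cs.length - (i + 1) := by
          rw [List.length_drop] at hk; omega
        rw [hsnd, hfst,
            ih (i + 1 + k) (out ++ ["@@LIT".toList ++ PySem.Int.toChars (lits.length : Int) ++ "@@".toList])
               (lits ++ [String.ofList (cs[i] :: (matchLitB cs[i] (cs.drop (i + 1))).1)])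
               (by omega) (by omega)]
        conv_rhs => rw [hd, scanB_cons_quote lits.length cs[i] (cs.drop (i + 1)) hc]
        rw [hdrop]
        simp
      · -- an ordinary character is copied
        rw [ih (i + 1) (out ++ [[cs[i]]]) lits (by omega) (by omega)]
        conv_rhs => rw [hd, scanB_cons_other lits.length cs[i] (cs.drop (i + 1)) hc]
        simp
    · have : i = cs.length := by omega
      subst this
      rw [loopA]
      simp [scanB_nil]

-- ===== VERDICT (by name: the statement is the Claim_ definition above) =====
theorem extract_literals_py_spec : Claim_equal_extract_literals_py := by
  intro line _
  unfold Spec_extract_literals_py extract_literals_py extract_literals_py_alt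
  have := loopA_eq line.toList line.toList.length 0 [] [] (by omega) (by omega)
  simp only [List.drop_zero, List.length_nil] at this
  simp [this]
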